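-- pv_equiv track=rewrite | github.com/IChowdhury01/Coding-Exercises | Algorithms/Python/Graphs/Find_Synonyms.py | listSynonyms
-- ===== SOURCE A (Python) =====
-- from collections import defaultdict
--
-- def listSynonyms(pairs: str, word: str) -> list[str]:
--     tokens = pairs.split(" ")
--
--     adj = defaultdict(list)
--
--     for t in tokens:
--         n1, n2 = t.split(":")
--         adj[n1].append(n2)
--         adj[n2].append(n1)
--
--     def dfs(node):
--         if node in visited:
--             return
--         res.append(node)
--         visited.add(node)
--         for neighbor in adj[node]:
--             dfs(neighbor)
--
--     res = []
--     visited = set()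
--
--     for root in adj.keys():
--         if root == word:
--             dfs(root)
--
--     return res[1:] if res else res
-- ===== SOURCE B (Python) =====
-- def listSynonyms(pairs: str, word: str) -> list[str]:
--     # Flat directed edge list instead of a dict; neighbors found by scanning it.
--     edges = []
--     for t in pairs.split(" "):
--         n1, n2 = t.split(":")
--         edges.append((n1, n2))
--         edges.append((n2, n1))
--     if all(a != word for a, _ in edges):
--         return []
--     res = []
--     seen = set()
--     stack = [word]
--     while stack:
--         node = stack.pop()
--         if node in seen:
--             continue
--         seen.add(node)
--         res.append(node)
--         for a, b in reversed(edges):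
--             if a == node:
--                 stack.append(b)
--     return res[1:]
-- ===== Notes on version B (the rewrite author's own statement) =====
-- stated objective: alternative
-- what changed: Replaces A's defaultdict adjacency plus recursive DFS launched from a scan over the dict keys by a flat directed edge list (no dict at all): membership of the start word is an any() over edge sources, neighbors are found by filtering the edge list, and the component is walked with an explicit stack (pop-time visited check, neighbors pushed in reverse), preserving A's exact pre-order; it trades the dict for a per-node edge scan.
import Mathlib
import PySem

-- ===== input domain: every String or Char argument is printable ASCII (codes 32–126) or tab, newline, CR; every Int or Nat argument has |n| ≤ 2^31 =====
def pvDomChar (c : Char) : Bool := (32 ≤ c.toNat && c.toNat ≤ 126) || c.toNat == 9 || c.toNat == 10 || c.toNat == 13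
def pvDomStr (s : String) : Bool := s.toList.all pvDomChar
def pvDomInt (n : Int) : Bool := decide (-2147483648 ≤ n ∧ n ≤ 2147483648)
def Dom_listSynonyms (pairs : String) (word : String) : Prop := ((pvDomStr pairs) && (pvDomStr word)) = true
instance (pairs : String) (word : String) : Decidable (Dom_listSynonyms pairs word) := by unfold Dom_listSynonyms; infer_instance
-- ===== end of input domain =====

-- B drops A's defaultdict adjacency and recursive DFS entirely: it keeps a flat directed edge
-- list, finds neighbors by scanning that list, and walks the component with an explicit stack;
-- objective: alternative (trades the dict for a simple edge list with a per-node edge scan).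

-- ===== PORT A =====

-- s.split(sep) for a nonempty literal sep (split? is always 'some' there)
def pySplit (s sep : String) : List String := (PySem.Str.split? s sep).getD []

-- one token t: n1, n2 = t.split(":"); adj[n1].append(n2); adj[n2].append(n1)
-- (defaultdict(list): a missing key is inserted with []); none = ValueError on unpacking
def stepA (adj : PySem.Dict String (List String)) (t : String) :
    Option (PySem.Dict String (List String)) :=
  match pySplit t ":" with
  | [n1, n2] =>
    let adj1 := adj.insert n1 (adj.getD n1 [] ++ [n2])
    some (adj1.insert n2 (adj1.getD n2 [] ++ [n1]))
  | _ => none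

def buildA (tokens : List String) : Option (PySem.Dict String (List String)) :=
  tokens.foldlM stepA PySem.Dict.empty

-- Python's dfs(node) together with its 'for neighbor in adj[node]' loop, flattened to one
-- recursion over the list of nodes still to be processed at the current level; the Nat fuel is a
-- pure totality guard (one unit per visit; on actual runs it starts at the number of keys and is
-- never exhausted, since only distinct keys are ever visited); the bundled proof p.1 ≤ f only
-- justifies termination.
def dfsA (adj : PySem.Dict String (List String)) :
    (f : Nat) → (ns : List String) → (v : PySem.Set String) → (r : List String) →
    {p : Nat × PySem.Set String × List String // p.1 ≤ f}
  | f, [], v, r => ⟨(f, v, r), Nat.le_refl f⟩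
  | f, n :: ns, v, r =>
    if PySem.Set.contains v n then dfsA adj f ns v r
    else
      match f with
      | 0 => dfsA adj 0 ns v r
      | f + 1 =>
        match dfsA adj f (adj.getD n []) (PySem.Set.add v n) (r ++ [n]) with
        | ⟨(f', v', r'), h⟩ =>
          let outer := dfsA adj f' ns v' r'
          ⟨outer.val, Nat.le_succ_of_le (Nat.le_trans outer.prop h)⟩
  termination_by f ns => (f, ns.length)
  decreasing_by
  · exact Prod.Lex.right _ (Nat.lt_succ_self _)
  · exact Prod.Lex.right _ (Nat.lt_succ_self _)
  · exact Prod.Lex.left _ _ (Nat.lt_succ_self _)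
  · exact Prod.Lex.left _ _ (Nat.lt_succ_of_le h)

def listSynonyms (pairs : String) (word : String) : List String :=
  match buildA (pySplit pairs " ") with
  | none => []   -- unreachable under Pre_listSynonyms (Python raises ValueError)
  | some adj =>
    let s := adj.keys.foldl
      (fun s root => if root == word then (dfsA adj s.1 [root] s.2.1 s.2.2).val else s)
      (adj.keys.length, PySem.Set.empty, ([] : List String))
    let res := s.2.2
    if res.isEmpty then res else PySem.List.slice res (some 1) none

-- ===== PORT B =====

-- one token: edges.append((n1, n2)); edges.append((n2, n1)); none = ValueError on unpacking
def stepB (E : List (String × String)) (t : String) : Option (List (String × String)) :=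
  match pySplit t ":" with
  | [n1, n2] => some (E ++ [(n1, n2), (n2, n1)])
  | _ => none

def buildB (tokens : List String) : Option (List (String × String)) :=
  tokens.foldlM stepB []

-- the inner 'for a, b in reversed(edges): if a == node: stack.append(b)' pushes, in reverse,
-- exactly the targets of the edges leaving node, i.e. reversed (nbrs E node); since the Lean
-- stack below is held TOP FIRST (the reverse of the Python list), the push is 'nbrs E n ++ st'
def nbrs (E : List (String × String)) (n : String) : List String :=
  (E.filter (fun e => e.1 == n)).map (·.2)

-- totality fuel for the while loop (Lean artifact only: one unit per visit suffices, since at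
-- most the distinct edge sources are ever visited)
def firstDedup (l : List String) : List String :=
  l.foldl (fun acc x => if x ∈ acc then acc else acc ++ [x]) []

-- B's while loop over the explicit stack, visited checked at pop time
def dfsB (E : List (String × String)) :
    (f : Nat) → (stack : List String) → (v : PySem.Set String) → (r : List String) →
    PySem.Set String × List String
  | _, [], v, r => (v, r)
  | f, n :: st, v, r =>
    if PySem.Set.contains v n then dfsB E f st v r
    else
      match f with
      | 0 => dfsB E 0 st v r
      | f + 1 => dfsB E f (nbrs E n ++ st) (PySem.Set.add v n) (r ++ [n])
  termination_by f st => (f, st.length)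
  decreasing_by
  · exact Prod.Lex.right _ (Nat.lt_succ_self _)
  · exact Prod.Lex.right _ (Nat.lt_succ_self _)
  · exact Prod.Lex.left _ _ (Nat.lt_succ_self _)

def listSynonyms_alt (pairs : String) (word : String) : List String :=
  match buildB (pySplit pairs " ") with
  | none => []   -- unreachable under Pre_listSynonyms (Python raises ValueError)
  | some E =>
    if E.any (fun e => e.1 == word) then
      PySem.List.slice
        (dfsB E (firstDedup (E.map (·.1))).length [word] PySem.Set.empty []).2 (some 1) none
    else []

-- ===== PRECONDITION & SPEC =====

-- Pre_: every space-separated token contains exactly one ':' (so t.split(":") yields exactly two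
-- parts); otherwise Python A (and B alike) raises ValueError unpacking 'n1, n2 = t.split(":")'.
-- This is exactly A's returning domain.
def Pre_listSynonyms (pairs : String) (_word : String) : Prop :=
  ∀ t ∈ pySplit pairs " ", t.toList.count ':' = 1
instance (pairs : String) (word : String) : Decidable (Pre_listSynonyms pairs word) := by
  unfold Pre_listSynonyms; infer_instance

def pvWitness_listSynonyms : String × String := ("a:b b:c", "a")

def Spec_listSynonyms (pairs : String) (word : String) (out : List String) : Prop :=
  out = listSynonyms_alt pairs word
instance (pairs : String) (word : String) (out : List String) :
    Decidable (Spec_listSynonyms pairs word out) := by unfold Spec_listSynonyms; infer_instance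

-- ===== CLAIM (what is proved, stated in full; the proofs are below) =====
def Claim_equal_listSynonyms : Prop := ∀ (pairs : String) (word : String),
  Dom_listSynonyms pairs word → Pre_listSynonyms pairs word →
  Spec_listSynonyms pairs word (listSynonyms pairs word)

-- ===== LEMMAS AND PROOFS =====

-- relation between A's dict and B's edge list maintained by the two builds
def BuildRel (adj : PySem.Dict String (List String)) (E : List (String × String)) : Prop :=
  (∀ n, adj.getD n [] = nbrs E n) ∧ adj.keys = firstDedup (E.map (·.1))

theorem mem_firstDedup_aux (x : String) :
    ∀ (l acc : List String),
    (x ∈ l.foldl (fun acc x => if x ∈ acc then acc else acc ++ [x]) acc) ↔ x ∈ acc ∨ x ∈ l := by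
  intro l
  induction l with
  | nil => simp
  | cons a l ih =>
    intro acc
    simp only [List.foldl_cons]
    by_cases ha : a ∈ acc
    · rw [if_pos ha, ih]
      constructor
      · rintro (h | h); exacts [Or.inl h, Or.inr (List.mem_cons_of_mem _ h)]
      · rintro (h | h)
        · exact Or.inl h
        · rcases List.mem_cons.mp h with h | h
          · exact Or.inl (h ▸ ha)
          · exact Or.inr h
    · rw [if_neg ha, ih]
      simp only [List.mem_append, List.mem_cons]
      tauto

theorem mem_firstDedup (x : String) (l : List String) : x ∈ firstDedup l ↔ x ∈ l := by
  rw [firstDedup, mem_firstDedup_aux]; simp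

-- keys of an insert, phrased as firstDedup's fold step
theorem keys_insert_step (d : PySem.Dict String (List String)) (k : String) (v : List String) :
    (d.insert k v).keys = if k ∈ d.keys then d.keys else d.keys ++ [k] := by
  by_cases c : d.contains k = true
  · rw [if_pos ((PySem.Dict.contains_iff_mem_keys d k).mp c),
      PySem.Dict.keys_insert_of_contains _ _ c]
  · rw [if_neg (fun h => c ((PySem.Dict.contains_iff_mem_keys d k).mpr h)),
      PySem.Dict.keys_insert_of_not_contains _ _ (by simpa using c)]

-- one build step preserves BuildRel
theorem brel_step (adj : PySem.Dict String (List String)) (E : List (String × String))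
    (n1 n2 : String) (h : BuildRel adj E) :
    BuildRel ((adj.insert n1 (adj.getD n1 [] ++ [n2])).insert n2
          (((adj.insert n1 (adj.getD n1 [] ++ [n2])).getD n2 []) ++ [n1]))
        (E ++ [(n1, n2), (n2, n1)]) := by
  obtain ⟨hg, hk⟩ := h
  constructor
  · intro n
    rw [nbrs, List.filter_append, List.map_append]
    rw [show (List.filter (fun e => e.1 == n) [(n1, n2), (n2, n1)]).map (·.2)
        = (if n1 = n then [n2] else []) ++ (if n2 = n then [n1] else []) by
      by_cases h1 : n1 = n <;> by_cases h2 : n2 = n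
      · subst h1; subst h2; simp [List.filter]
      · subst h1; simp [List.filter, beq_eq_false_iff_ne.mpr h2]; aesop
      · subst h2; simp [List.filter, beq_eq_false_iff_ne.mpr h1]; aesop
      · simp [List.filter, beq_eq_false_iff_ne.mpr h1, beq_eq_false_iff_ne.mpr h2]; aesop]
    rw [← nbrs, ← hg n]
    rw [PySem.Dict.getD_insert, PySem.Dict.getD_insert, PySem.Dict.getD_insert]
    by_cases h2 : n = n2 <;> by_cases h1 : n = n1 <;> simp_all <;> aesop
  · have hmapfst : (E ++ [(n1, n2), (n2, n1)]).map (fun p => p.1) = E.map (·.1) ++ [n1, n2] := by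
      simp
    rw [hmapfst, firstDedup, List.foldl_append, ← firstDedup]
    simp only [List.foldl_cons, List.foldl_nil]
    rw [← hk, keys_insert_step, keys_insert_step]

-- one token handled in lockstep: both steps fail, or both succeed with related results
theorem step_rel (adj : PySem.Dict String (List String)) (E : List (String × String))
    (t : String) (h : BuildRel adj E) :
    (stepA adj t = none ∧ stepB E t = none) ∨
    (∃ adj' E', stepA adj t = some adj' ∧ stepB E t = some E' ∧ BuildRel adj' E') := by
  rcases hsp : pySplit t ":" with _ | ⟨n1, _ | ⟨n2, _ | ⟨n3, rest⟩⟩⟩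
  · exact Or.inl ⟨by rw [stepA, hsp], by rw [stepB, hsp]⟩
  · exact Or.inl ⟨by rw [stepA, hsp], by rw [stepB, hsp]⟩
  · exact Or.inr ⟨_, _, by rw [stepA, hsp], by rw [stepB, hsp], brel_step adj E n1 n2 h⟩
  · exact Or.inl ⟨by rw [stepA, hsp], by rw [stepB, hsp]⟩

-- the two builds run in lockstep: both fail on the same token, or both succeed related
theorem build_rel :
    ∀ (ts : List String) (adj : PySem.Dict String (List String)) (E : List (String × String)),
    BuildRel adj E →
    (ts.foldlM stepA adj = none ∧ ts.foldlM stepB E = none) ∨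
    (∃ adj' E', ts.foldlM stepA adj = some adj' ∧ ts.foldlM stepB E = some E' ∧ BuildRel adj' E') := by
  intro ts
  induction ts with
  | nil => intro adj E h; exact Or.inr ⟨adj, E, rfl, rfl, h⟩
  | cons t ts ih =>
    intro adj E h
    rw [List.foldlM_cons, List.foldlM_cons]
    rcases step_rel adj E t h with ⟨ha, hb⟩ | ⟨a', e', ha, hb, hrel⟩
    · rw [ha, hb]; exact Or.inl ⟨rfl, rfl⟩
    · rw [ha, hb]; exact ih a' e' hrel

-- the key bridge: B's stack machine on ns ++ st equals first processing ns with A's recursion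
-- (consuming the same fuel) and then continuing the stack machine on st from the resulting state
theorem bridge (adj : PySem.Dict String (List String)) (E : List (String × String))
    (hnb : ∀ n, adj.getD n [] = nbrs E n) :
    ∀ (f : Nat) (ns : List String) (v : PySem.Set String) (r : List String) (st : List String),
    dfsB E f (ns ++ st) v r =
      dfsB E (dfsA adj f ns v r).val.1 st (dfsA adj f ns v r).val.2.1
        (dfsA adj f ns v r).val.2.2 := by
  intro f ns v r
  induction f, ns, v, r using dfsA.induct adj with
  | case1 f v r => intro st; simp [dfsA]
  | case2 f n ns v r hc ih =>
    intro st
    rw [List.cons_append]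
    rw [dfsB.eq_def, dfsA.eq_def]
    simp only [hc, if_true]
    exact ih st
  | case3 n ns v r hc ih =>
    intro st
    rw [List.cons_append]
    rw [dfsB.eq_def, dfsA.eq_def]
    simp only [hc, Bool.false_eq_true, if_false]
    exact ih st
  | case4 n ns v r hc f f' v' r' h heq ih1 ih2 =>
    intro st
    rw [List.cons_append]
    rw [dfsB.eq_def]
    simp only [hc, Bool.false_eq_true, if_false]
    rw [show nbrs E n ++ (ns ++ st) = (adj.getD n [] ++ ns) ++ st by rw [hnb n]; simp]
    rw [show adj.getD n [] ++ ns = adj.getD n [] ++ ns from rfl]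
    have e1 : dfsB E f ((adj.getD n []) ++ (ns ++ st)) (v.add n) (r ++ [n]) =
        dfsB E f' (ns ++ st) v' r' := by
      have := ih1 (ns ++ st)
      rwa [heq] at this
    rw [List.append_assoc]
    rw [e1]
    rw [dfsA.eq_def]
    simp only [hc, heq, Bool.false_eq_true, if_false]
    rw [heq]
    exact ih2 st

theorem dfsA_mem_visited (adj : PySem.Dict String (List String)) :
    ∀ (f : Nat) (ns : List String) (v : PySem.Set String) (r : List String) (x : String),
    x ∈ v → x ∈ (dfsA adj f ns v r).val.2.1 := by
  intro f ns v r
  induction f, ns, v, r using dfsA.induct adj with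
  | case1 f v r => intro x hx; simpa [dfsA] using hx
  | case2 f n ns v r hc ih =>
    intro x hx
    rw [dfsA.eq_def]; simp only [hc, if_true]
    exact ih x hx
  | case3 n ns v r hc ih =>
    intro x hx
    rw [dfsA.eq_def]; simp only [hc, Bool.false_eq_true, if_false]
    exact ih x hx
  | case4 n ns v r hc f f' v' r' h heq ih1 ih2 =>
    intro x hx
    rw [dfsA.eq_def]; simp only [hc, heq, Bool.false_eq_true, if_false]
    rw [heq]
    refine ih2 x ?_
    have : x ∈ (dfsA adj f (adj.getD n []) (v.add n) (r ++ [n])).val.2.1 :=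
      ih1 x ((PySem.Set.mem_add v n x).mpr (Or.inl hx))
    rw [heq] at this
    exact this

theorem dfsA_res_prefix (adj : PySem.Dict String (List String)) :
    ∀ (f : Nat) (ns : List String) (v : PySem.Set String) (r : List String),
    ∃ t, (dfsA adj f ns v r).val.2.2 = r ++ t := by
  intro f ns v r
  induction f, ns, v, r using dfsA.induct adj with
  | case1 f v r => exact ⟨[], by simp [dfsA]⟩
  | case2 f n ns v r hc ih =>
    rw [dfsA.eq_def]; simp only [hc, if_true]; exact ih
  | case3 n ns v r hc ih =>
    rw [dfsA.eq_def]; simp only [hc, Bool.false_eq_true, if_false]; exact ih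
  | case4 n ns v r hc f f' v' r' h heq ih1 ih2 =>
    rw [dfsA.eq_def]; simp only [hc, heq, Bool.false_eq_true, if_false]
    rw [heq]
    obtain ⟨t2, ht2⟩ := ih2
    obtain ⟨t1, ht1⟩ := ih1
    rw [heq] at ht1
    simp only at ht1
    exact ⟨n :: (t1 ++ t2), by rw [ht2, ht1]; simp⟩

-- one visiting step from the start word: the word ends up visited and heads the appended output
theorem dfsA_start (adj : PySem.Dict String (List String)) (f : Nat) (w : String)
    (v : PySem.Set String) (r : List String) (hc : v.contains w = false) :
    w ∈ (dfsA adj (f + 1) [w] v r).val.2.1 ∧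
      ∃ t, (dfsA adj (f + 1) [w] v r).val.2.2 = r ++ w :: t := by
  rcases hA : dfsA adj f (adj.getD w []) (v.add w) (r ++ [w]) with ⟨⟨f', v', r'⟩, hle⟩
  have hcm : w ∉ v := fun h => by
    rw [(PySem.Set.contains_iff v w).mpr h] at hc; exact Bool.true_eq_false ▸ hc.symm ▸ rfl
  have hstep : (dfsA adj (f + 1) [w] v r).val = (f', v', r') := by
    rw [dfsA.eq_def]
    simp only [hA, dfsA]
    rw [if_neg (fun hcv => hcm ((PySem.Set.contains_iff v w).mp hcv))]
  constructor
  · rw [hstep]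
    have := dfsA_mem_visited adj f (adj.getD w []) (v.add w) (r ++ [w]) w
      ((PySem.Set.mem_add v w w).mpr (Or.inr rfl))
    rw [hA] at this
    exact this
  · obtain ⟨t1, ht1⟩ := dfsA_res_prefix adj f (adj.getD w []) (v.add w) (r ++ [w])
    rw [hA] at ht1
    exact ⟨t1, by rw [hstep]; simpa using ht1⟩

-- a skipped start: dfsA on [w] leaves the state unchanged when w is already visited …
theorem dfsA_single_skip (adj : PySem.Dict String (List String)) (f : Nat) (w : String)
    (v : PySem.Set String) (r : List String) (hc : v.contains w = true) :
    (dfsA adj f [w] v r).val = (f, v, r) := by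
  have hm : w ∈ v := (PySem.Set.contains_iff v w).mp hc
  rw [dfsA.eq_def]; simp [hm, dfsA]

-- … or when the fuel is exhausted
theorem dfsA_single_zero (adj : PySem.Dict String (List String)) (w : String)
    (v : PySem.Set String) (r : List String) :
    (dfsA adj 0 [w] v r).val = (0, v, r) := by
  rw [dfsA.eq_def]
  by_cases hm : w ∈ v <;> simp [hm, dfsA]

-- A's loop over the keys: every step is the identity once word is visited
theorem foldA_skip (adj : PySem.Dict String (List String)) (word : String) :
    ∀ (ks : List String) (s : Nat × PySem.Set String × List String),
    s.2.1.contains word = true →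
    ks.foldl (fun s root => if root == word then (dfsA adj s.1 [root] s.2.1 s.2.2).val else s) s
      = s := by
  intro ks
  induction ks with
  | nil => intro s _; rfl
  | cons k ks ih =>
    intro s hs
    rcases s with ⟨f, v, r⟩
    by_cases hk : k = word
    · subst hk
      simp only [List.foldl_cons, beq_self_eq_true, if_true]
      rw [dfsA_single_skip adj f k v r hs]
      exact ih (f, v, r) hs
    · simp only [List.foldl_cons, beq_eq_false_iff_ne.mpr hk, Bool.false_eq_true]
      exact ih (f, v, r) hs

-- … and likewise once the fuel is exhausted
theorem foldA_zero (adj : PySem.Dict String (List String)) (word : String) :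
    ∀ (ks : List String) (v : PySem.Set String) (r : List String),
    ks.foldl (fun s root => if root == word then (dfsA adj s.1 [root] s.2.1 s.2.2).val else s)
      (0, v, r) = (0, v, r) := by
  intro ks
  induction ks with
  | nil => intro v r; rfl
  | cons k ks ih =>
    intro v r
    by_cases hk : k = word
    · subst hk
      simp only [List.foldl_cons, beq_self_eq_true, if_true]
      rw [dfsA_single_zero adj k v r]
      exact ih v r
    · simp only [List.foldl_cons, beq_eq_false_iff_ne.mpr hk, Bool.false_eq_true]
      exact ih v r

-- A's loop over the keys equals: one dfs call from word if word occurs, else the identity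
theorem foldA_eq (adj : PySem.Dict String (List String)) (word : String) :
    ∀ (ks : List String) (f : Nat) (v : PySem.Set String) (r : List String),
    v.contains word = false →
    ks.foldl (fun s root => if root == word then (dfsA adj s.1 [root] s.2.1 s.2.2).val else s)
      (f, v, r) = if word ∈ ks then (dfsA adj f [word] v r).val else (f, v, r) := by
  intro ks
  induction ks with
  | nil => intro f v r _; rfl
  | cons k ks ih =>
    intro f v r hv
    by_cases hk : k = word
    · subst hk
      simp only [List.foldl_cons, beq_self_eq_true, if_true, List.mem_cons, true_or]
      cases f with
      | zero =>
        rw [dfsA_single_zero adj k v r]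
        exact foldA_zero adj k ks v r
      | succ f =>
        have hmem := (dfsA_start adj f k v r hv).1
        exact foldA_skip adj k ks _ ((PySem.Set.contains_iff _ _).mpr hmem)
    · have hne : (k == word) = false := beq_eq_false_iff_ne.mpr hk
      simp only [List.foldl_cons, hne, Bool.false_eq_true, if_false, List.mem_cons]
      rw [ih f v r hv]
      have hks : (word = k) = False := eq_false (fun h => hk h.symm)
      simp [hks]

-- splitting on a one-character separator yields one more piece than occurrences of the separator
theorem splitOn_go_length (c : Char) :
    ∀ (fuel : Nat) (l cur : List Char) (acc : List (List Char)), l.length < fuel →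
    (PySem.Chars.splitOn.go [c] fuel l cur acc).length = acc.length + l.count c + 1 := by
  intro fuel
  induction fuel with
  | zero => intro l cur acc h; omega
  | succ fuel ih =>
    intro l cur acc h
    cases l with
    | nil => simp [PySem.Chars.splitOn.go]
    | cons c' rest =>
      rw [PySem.Chars.splitOn.go]
      by_cases hcc : c = c'
      · subst hcc
        have hp : List.isPrefixOf [c] (c :: rest) = true := by simp [List.isPrefixOf]
        rw [if_pos hp]
        rw [show List.drop [c].length (c :: rest) = rest by simp]
        rw [ih rest [] (cur.reverse :: acc) (by simpa using Nat.lt_of_succ_lt_succ h)]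
        simp
        omega
      · have hp : List.isPrefixOf [c] (c' :: rest) = false := by
          simp [List.isPrefixOf, beq_eq_false_iff_ne.mpr hcc]
        rw [if_neg (by simp [hp])]
        rw [ih rest (c' :: cur) acc (by simpa using Nat.lt_of_succ_lt_succ h)]
        have hcc' : ¬c' = c := fun hh => hcc hh.symm
        simp [hcc']

theorem pySplit_colon_length (t : String) :
    (pySplit t ":").length = t.toList.count ':' + 1 := by
  have : (PySem.Str.split? t ":") =
      some ((PySem.Chars.splitOn t.toList [':']).map String.ofList) := by
    simp [PySem.Str.split?, PySem.Chars.split?]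
  rw [pySplit, this]
  simp only [Option.getD_some, List.length_map, PySem.Chars.splitOn]
  rw [splitOn_go_length ':' (t.toList.length + 1) t.toList [] [] (Nat.lt_succ_self _)]
  simp

-- every token of a Pre_-admissible list splits in two, so the dict build succeeds
theorem buildA_some :
    ∀ (ts : List String) (acc : PySem.Dict String (List String)),
    (∀ t ∈ ts, t.toList.count ':' = 1) →
    ∃ adj, ts.foldlM stepA acc = some adj := by
  intro ts
  induction ts with
  | nil => intro acc _; exact ⟨acc, rfl⟩
  | cons t ts ih =>
    intro acc h
    obtain ⟨n1, n2, hsp⟩ := List.length_eq_two.mp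
      (by rw [pySplit_colon_length, h t (List.mem_cons_self ..)])
    have hstep : stepA acc t =
        some ((acc.insert n1 (acc.getD n1 [] ++ [n2])).insert n2
          (((acc.insert n1 (acc.getD n1 [] ++ [n2])).getD n2 []) ++ [n1])) := by
      rw [stepA, hsp]
    obtain ⟨adj, hadj⟩ := ih _ (fun t ht => h t (List.mem_cons_of_mem _ ht))
    exact ⟨adj, by rw [List.foldlM_cons, hstep]; exact hadj⟩

-- ===== VERDICT (by name: the statement is the Claim_ definition above) =====
theorem listSynonyms_spec : Claim_equal_listSynonyms := by
  intro pairs word _ hpre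
  unfold Spec_listSynonyms listSynonyms listSynonyms_alt
  obtain ⟨adj0, hadj0⟩ := buildA_some (pySplit pairs " ") PySem.Dict.empty hpre
  have hrel0 : BuildRel PySem.Dict.empty [] := by
    constructor
    · intro n; simp [nbrs, PySem.Dict.getD_empty]
    · simp [firstDedup, PySem.Dict.keys_empty]
  rcases build_rel (pySplit pairs " ") PySem.Dict.empty [] hrel0 with ⟨hA, _⟩ | ⟨adj, E, hA, hB, hrel⟩
  · rw [hA] at hadj0
    exact absurd hadj0 (by simp)
  · rw [show buildA (pySplit pairs " ") = some adj from hA,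
      show buildB (pySplit pairs " ") = some E from hB]
    simp only
    obtain ⟨hnb, hkeys⟩ := hrel
    have hfuel : adj.keys.length = (firstDedup (E.map (·.1))).length := by rw [hkeys]
    have hmemiff : word ∈ adj.keys ↔ (E.any (fun e => e.1 == word)) = true := by
      rw [hkeys, mem_firstDedup]
      simp only [List.any_eq_true, beq_iff_eq, List.mem_map]
    by_cases hw : (E.any (fun e => e.1 == word)) = true
    · have hmem : word ∈ adj.keys := hmemiff.mpr hw
      have hempty : (PySem.Set.empty : PySem.Set String).contains word = false := by
        simp [PySem.Set.empty]
      rw [foldA_eq adj word adj.keys adj.keys.length PySem.Set.empty [] hempty, if_pos hmem]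
      have hpos : 0 < adj.keys.length := List.length_pos_of_mem hmem
      obtain ⟨m, hm⟩ : ∃ m, adj.keys.length = m + 1 := ⟨adj.keys.length - 1, by omega⟩
      have hBrun := bridge adj E hnb adj.keys.length [word] PySem.Set.empty [] []
      simp only [List.append_nil] at hBrun
      have hB2 : (dfsB E adj.keys.length [word] PySem.Set.empty []).2 =
          (dfsA adj adj.keys.length [word] PySem.Set.empty []).val.2.2 := by
        rw [hBrun]; simp [dfsB]
      obtain ⟨t, ht⟩ := by
        have := (dfsA_start adj m word PySem.Set.empty [] hempty).2
        rwa [← hm] at this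
      rw [hw]
      simp only [if_true]
      rw [← hfuel, hB2, ht]
      simp
    · have hmem : word ∉ adj.keys := fun h => hw (hmemiff.mp h)
      have hempty : (PySem.Set.empty : PySem.Set String).contains word = false := by
        simp [PySem.Set.empty]
      rw [foldA_eq adj word adj.keys adj.keys.length PySem.Set.empty [] hempty, if_neg hmem]
      simp [hw]
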